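-- pv_equiv track=rewrite | github.com/SirGibblets/achew | backend/app/services/smart_detection_service.py | _filter_consecutive_counts
-- ===== SOURCE A (Python) =====
-- from typing import List, Tuple, Dict
--
-- def _filter_consecutive_counts(chapter_counts: List[int]) -> List[int]:
--     """Filter out consecutive counts to reduce cue set options.
--
--     For groups of sequential counts:
--     - If group has only 2 options: keep the higher option
--     - If group has 3+ options: keep first and last option in the group
--     """
--     if len(chapter_counts) <= 1:
--         return chapter_counts
--
--     filtered_counts = []
--     i = 0
--
--     while i < len(chapter_counts):
--         # Start of a potential consecutive group
--         group_start = i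
--
--         # Find the end of the consecutive group
--         while i + 1 < len(chapter_counts) and chapter_counts[i + 1] == chapter_counts[i] + 1:
--             i += 1
--
--         group_end = i
--         group_size = group_end - group_start + 1
--
--         if group_size == 1:
--             # Single item, keep it
--             filtered_counts.append(chapter_counts[group_start])
--         elif group_size == 2:
--             # Two consecutive items, keep the higher one
--             filtered_counts.append(chapter_counts[group_end])
--         else:
--             # Three or more consecutive items, keep first and last
--             filtered_counts.append(chapter_counts[group_start])
--             if chapter_counts[group_start] != chapter_counts[group_end]:  # Avoid duplicates
--                 filtered_counts.append(chapter_counts[group_end])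
--
--         i += 1
--
--     return sorted(filtered_counts)
-- ===== SOURCE B (Python) =====
-- from typing import List
--
--
-- def _filter_consecutive_counts(chapter_counts: List[int]) -> List[int]:
--     """Stateless rewrite: instead of walking runs with an index cursor, test each
--     position against its local 3-neighbourhood.  An element is dropped exactly
--     when it is the interior of a consecutive run, or the lower member of a
--     run of exactly two; everything else is kept, then sorted."""
--     n = len(chapter_counts)
--
--     def keep(i: int) -> bool:
--         v = chapter_counts[i]
--         prev = i > 0 and chapter_counts[i - 1] == v - 1
--         nxt = i + 1 < n and chapter_counts[i + 1] == v + 1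
--         nxt2 = i + 2 < n and chapter_counts[i + 2] == v + 2
--         if prev and nxt:
--             return False  # interior of a run of 3+
--         if not prev and nxt and not nxt2:
--             return False  # lower member of a run of exactly 2
--         return True
--
--     return sorted(v for i, v in enumerate(chapter_counts) if keep(i))
-- ===== Notes on version B (the rewrite author's own statement) =====
-- stated objective: alternative
-- what changed: A walks the list with an index cursor and a nested while-loop maintaining run boundaries and an accumulator; B is stateless: it keeps exactly the elements whose local 3-neighbourhood (previous, next, next-next values) marks them as neither the interior of a consecutive run nor the lower member of a run of exactly two, via a single filter over enumerate, then sorts.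
import Mathlib
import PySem

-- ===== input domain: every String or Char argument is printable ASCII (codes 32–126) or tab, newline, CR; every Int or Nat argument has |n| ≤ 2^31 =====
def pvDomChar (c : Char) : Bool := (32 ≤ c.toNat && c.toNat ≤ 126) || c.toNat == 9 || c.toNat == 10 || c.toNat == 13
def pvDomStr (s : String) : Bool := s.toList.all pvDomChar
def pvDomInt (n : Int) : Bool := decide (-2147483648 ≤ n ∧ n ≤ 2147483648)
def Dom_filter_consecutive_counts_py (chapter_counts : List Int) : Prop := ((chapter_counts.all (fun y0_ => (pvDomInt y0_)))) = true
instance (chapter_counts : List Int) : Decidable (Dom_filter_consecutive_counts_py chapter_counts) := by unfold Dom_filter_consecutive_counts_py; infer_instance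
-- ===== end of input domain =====

-- B replaces A's stateful index-cursor run walk by a stateless per-position filter
-- on the local 3-neighbourhood (alternative decomposition; same cost).


-- ===== PORT A =====
-- inner while loop: advance i while chapter_counts[i+1] == chapter_counts[i] + 1
-- (every index A reads is in range along its loop, so getD is exact for Python's cs[i])
def pvFindEnd (cs : List Int) (i : Nat) : Nat :=
  if h : i + 1 < cs.length ∧ cs.getD (i+1) 0 = cs.getD i 0 + 1 then
    pvFindEnd cs (i+1)
  else i
termination_by cs.length - i
decreasing_by omega

-- needed by pvOuter's termination argument
theorem pvFindEnd_ge (cs : List Int) (i : Nat) : i ≤ pvFindEnd cs i := by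
  induction i using pvFindEnd.induct (cs := cs) with
  | case1 i h ih => rw [pvFindEnd, dif_pos h]; omega
  | case2 i h => rw [pvFindEnd, dif_neg h]

-- outer while loop with accumulator filtered_counts
def pvOuter (cs : List Int) (i : Nat) (acc : List Int) : List Int :=
  if h : i < cs.length then
    let e := pvFindEnd cs i
    let gsize := e - i + 1
    let acc' :=
      if gsize = 1 then acc ++ [cs.getD i 0]
      else if gsize = 2 then acc ++ [cs.getD e 0]
      else
        (acc ++ [cs.getD i 0]) ++
          (if cs.getD i 0 ≠ cs.getD e 0 then [cs.getD e 0] else [])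
    pvOuter cs (e + 1) acc'
  else acc
termination_by cs.length - i
decreasing_by have := pvFindEnd_ge cs i; omega

def filter_consecutive_counts_py (chapter_counts : List Int) : List Int :=
  if chapter_counts.length ≤ 1 then chapter_counts
  else PySem.List.sorted (pvOuter chapter_counts 0 []) (fun x => x) false

-- ===== PORT B =====
-- the local predicate keep(i): neighbours read through the same guarded lookups as Source B
def pvKeep (cs : List Int) (i : Nat) : Bool :=
  let v := cs.getD i 0
  let prev : Bool := decide (0 < i ∧ cs.getD (i-1) 0 = v - 1)
  let nxt : Bool := decide (i + 1 < cs.length ∧ cs.getD (i+1) 0 = v + 1)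
  let nxt2 : Bool := decide (i + 2 < cs.length ∧ cs.getD (i+2) 0 = v + 2)
  if prev && nxt then false
  else if !prev && nxt && !nxt2 then false
  else true

-- sorted(v for i, v in enumerate(xs) if keep(i))
def filter_consecutive_counts_py_alt (chapter_counts : List Int) : List Int :=
  PySem.List.sorted
    (((List.range chapter_counts.length).filter (pvKeep chapter_counts)).map
      (fun i => chapter_counts.getD i 0))
    (fun x => x) false

-- ===== PRECONDITION & SPEC =====
def Spec_filter_consecutive_counts_py (chapter_counts : List Int) (out : List Int) : Prop := out = filter_consecutive_counts_py_alt chapter_counts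
instance (chapter_counts : List Int) (out : List Int) : Decidable (Spec_filter_consecutive_counts_py chapter_counts out) := by unfold Spec_filter_consecutive_counts_py; infer_instance

-- ===== CLAIM (what is proved, stated in full; the proofs are below) =====
def Claim_equal_filter_consecutive_counts_py : Prop := ∀ (chapter_counts : List Int), Dom_filter_consecutive_counts_py chapter_counts → Spec_filter_consecutive_counts_py chapter_counts (filter_consecutive_counts_py chapter_counts)

-- ===== LEMMAS AND PROOFS =====

theorem pvFindEnd_lt (cs : List Int) (i : Nat) (h : i < cs.length) :
    pvFindEnd cs i < cs.length := by
  induction i using pvFindEnd.induct (cs := cs) with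
  | case1 i hc ih => rw [pvFindEnd, dif_pos hc]; exact ih hc.1
  | case2 i hc => rw [pvFindEnd, dif_neg hc]; omega

-- the values along the run step by +1
theorem pvFindEnd_consec (cs : List Int) (i : Nat) :
    ∀ j, i ≤ j → j < pvFindEnd cs i →
      j + 1 < cs.length ∧ cs.getD (j+1) 0 = cs.getD j 0 + 1 := by
  induction i using pvFindEnd.induct (cs := cs) with
  | case1 i hc ih =>
    intro j hij hjlt
    rw [pvFindEnd, dif_pos hc] at hjlt
    rcases Nat.eq_or_lt_of_le hij with rfl | hlt
    · exact hc
    · exact ih j hlt hjlt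
  | case2 i hc =>
    intro j hij hjlt
    rw [pvFindEnd, dif_neg hc] at hjlt
    omega

-- the run stops at pvFindEnd
theorem pvFindEnd_stop (cs : List Int) (i : Nat) :
    ¬ (pvFindEnd cs i + 1 < cs.length ∧
       cs.getD (pvFindEnd cs i + 1) 0 = cs.getD (pvFindEnd cs i) 0 + 1) := by
  induction i using pvFindEnd.induct (cs := cs) with
  | case1 i hc ih => rw [pvFindEnd, dif_pos hc]; exact ih
  | case2 i hc => rw [pvFindEnd, dif_neg hc]; exact hc

-- B's kept values, restricted to indices ≥ i
def pvKeptFrom (cs : List Int) (i : Nat) : List Int :=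
  ((List.range' i (cs.length - i)).filter (pvKeep cs)).map (fun j => cs.getD j 0)

theorem pvOuter_eq_kept (cs : List Int) (i : Nat) (acc : List Int) :
    (i = 0 ∨ ¬ (0 < i ∧ cs.getD (i-1) 0 = cs.getD i 0 - 1)) →
    pvOuter cs i acc = acc ++ pvKeptFrom cs i := by
  induction i, acc using pvOuter.induct (cs := cs) with
  | case1 i acc h e gsize acc' ih =>
    intro hrs
    have he_lt : e < cs.length := pvFindEnd_lt cs i h
    have he_ge : i ≤ e := pvFindEnd_ge cs i
    have hcons : ∀ j, i ≤ j → j < e →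
        j + 1 < cs.length ∧ cs.getD (j+1) 0 = cs.getD j 0 + 1 := pvFindEnd_consec cs i
    have hstop : ¬ (e + 1 < cs.length ∧ cs.getD (e + 1) 0 = cs.getD e 0 + 1) :=
      pvFindEnd_stop cs i
    have hstep : pvOuter cs i acc = pvOuter cs (e + 1) acc' := by
      rw [pvOuter, dif_pos h]; rfl
    -- run start: keep's prev is false at i
    have hprev : ¬ (0 < i ∧ cs.getD (i-1) 0 = cs.getD i 0 - 1) := by
      rcases hrs with rfl | hrs
      · omega
      · exact hrs
    -- split the remaining indices at the end of the run
    have hsplit : List.range' i (cs.length - i)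
        = List.range' i (e + 1 - i) ++ List.range' (e+1) (cs.length - (e+1)) := by
      have t : List.range' i ((e + 1 - i) + (cs.length - (e+1)))
          = List.range' i (e + 1 - i) ++ List.range' (i + (e + 1 - i)) (cs.length - (e+1)) :=
        (List.range'_append_1).symm
      rw [show i + (e + 1 - i) = e + 1 from by omega] at t
      rw [show cs.length - i = (e + 1 - i) + (cs.length - (e+1)) from by omega, t]
    have hrest : pvKeptFrom cs i =
        (((List.range' i (e + 1 - i)).filter (pvKeep cs)).map (fun j => cs.getD j 0))
          ++ pvKeptFrom cs (e+1) := by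
      rw [pvKeptFrom, hsplit, List.filter_append, List.map_append]; rfl
    -- tail via the IH (or: nothing left)
    have htail : pvOuter cs (e+1) acc' = acc' ++ pvKeptFrom cs (e+1) := by
      by_cases he1 : e + 1 < cs.length
      · apply ih
        right
        intro ⟨_, hv⟩
        simp only [Nat.add_sub_cancel] at hv
        exact hstop ⟨he1, by omega⟩
      · rw [pvOuter, dif_neg he1, pvKeptFrom,
            Nat.sub_eq_zero_of_le (by omega), List.range'_zero]
        simp
    rw [hstep, htail, hrest]
    -- it remains to show acc' = acc ++ (filtered run segment)
    suffices hseg :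
        (((List.range' i (e + 1 - i)).filter (pvKeep cs)).map (fun j => cs.getD j 0))
          = (if gsize = 1 then [cs.getD i 0]
             else if gsize = 2 then [cs.getD e 0]
             else [cs.getD i 0] ++
               (if cs.getD i 0 ≠ cs.getD e 0 then [cs.getD e 0] else [])) by
      show acc' ++ _ = acc ++ _
      rw [hseg]
      simp only [acc']
      split_ifs <;> simp
    have hgs : gsize = e - i + 1 := rfl
    rcases Nat.lt_or_ge (e - i) 2 with hlt | hge2
    · interval_cases hd : e - i
      · -- run of size 1: e = i, keep i
        have he : e = i := by omega
        have hk : pvKeep cs i = true := by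
          rw [he] at hstop
          simp only [List.getD] at hprev hstop
          simp [pvKeep, List.getD]
          omega
        have : e + 1 - i = 1 := by omega
        rw [this, List.range'_one]
        simp [hk, hgs]
      · -- run of size 2: e = i+1, keep only i+1
        have he : e = i + 1 := by omega
        have hc1 := hcons i (le_refl i) (by omega)
        rw [he] at hstop
        obtain ⟨hc1a, hc1b⟩ := hc1
        simp only [List.getD] at hprev hstop hc1a hc1b
        have hstop' : ¬ (i + 2 < cs.length ∧ cs[i+2]?.getD 0 = cs[i+1]?.getD 0 + 1) := hstop
        have hki : pvKeep cs i = false := by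
          simp [pvKeep, List.getD]
          omega
        have hke : pvKeep cs (i+1) = true := by
          have hq : cs[i+1+1]?.getD (0:Int) = cs[i+2]?.getD 0 := rfl
          simp [pvKeep, List.getD]
          omega
        have : e + 1 - i = 2 := by omega
        rw [this]
        have : List.range' i 2 = [i, i+1] := by simp [List.range'_succ]
        rw [this]
        simp [hki, hke, hgs, he]
    · -- run of size 3+: keep i and e only
      have hki : pvKeep cs i = true := by
        obtain ⟨h1a, h1b⟩ := hcons i (le_refl i) (by omega)
        obtain ⟨h2a, h2b⟩ := hcons (i+1) (by omega) (by omega)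
        simp only [List.getD] at hprev h1a h1b h2a h2b
        have hq : cs[i+1+1]?.getD (0:Int) = cs[i+2]?.getD 0 := rfl
        simp [pvKeep, List.getD]
        omega
      have hke : pvKeep cs e = true := by
        obtain ⟨hpa, hpb⟩ := hcons (e-1) (by omega) (by omega)
        rw [show e - 1 + 1 = e from by omega] at hpa hpb
        simp only [List.getD] at hpa hpb hstop
        simp [pvKeep, List.getD]
        omega
      have hmid : ∀ j ∈ List.range' (i+1) (e - i - 1), pvKeep cs j = false := by
        intro j hj
        rw [List.mem_range'] at hj
        obtain ⟨hj1, hj2⟩ := hj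
        obtain ⟨hpa, hpb⟩ := hcons (j-1) (by omega) (by omega)
        rw [show j - 1 + 1 = j from by omega] at hpa hpb
        obtain ⟨hna, hnb⟩ := hcons j (by omega) (by omega)
        simp only [List.getD] at hpa hpb hna hnb
        simp [pvKeep, List.getD]
        omega
      have hne : cs.getD i 0 ≠ cs.getD e 0 := by
        -- along the run, values strictly increase; endpoints of a 3+ run differ
        have : ∀ k, k ≤ e - i → cs.getD (i+k) 0 = cs.getD i 0 + (k : Int) := by
          intro k
          induction k with
          | zero => simp
          | succ m ihm =>
            intro hm
            have hc := hcons (i+m) (by omega) (by omega)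
            have : i + (m+1) = (i + m) + 1 := by omega
            rw [this, hc.2, ihm (by omega)]
            push_cast; ring
        have hv := this (e - i) (le_refl _)
        have : i + (e - i) = e := by omega
        rw [this] at hv
        rw [hv]; omega
      have hsplit3 : List.range' i (e + 1 - i)
          = [i] ++ List.range' (i+1) (e - i - 1) ++ [e] := by
        rw [show e + 1 - i = 1 + (e - i - 1) + 1 from by omega,
            ← List.range'_append_1, ← List.range'_append_1]
        rw [show i + (1 + (e - i - 1)) = e from by omega]
        simp [List.range'_one]
      have hmidnil : (List.range' (i+1) (e - i - 1)).filter (pvKeep cs) = [] :=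
        List.filter_eq_nil_iff.mpr (fun j hj => by simp [hmid j hj])
      rw [hsplit3, List.filter_append, List.filter_append, List.map_append,
          List.map_append, hmidnil]
      rw [if_neg (show ¬ gsize = 1 by rw [hgs]; omega),
          if_neg (show ¬ gsize = 2 by rw [hgs]; omega), if_pos hne]
      simp [hki, hke]
  | case2 i acc h =>
    intro _
    rw [pvOuter, dif_neg h, pvKeptFrom,
        Nat.sub_eq_zero_of_le (by omega), List.range'_zero]
    simp

-- ===== VERDICT (by name: the statement is the Claim_ definition above) =====
theorem filter_consecutive_counts_py_spec : Claim_equal_filter_consecutive_counts_py := by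
  intro cs _
  unfold Spec_filter_consecutive_counts_py filter_consecutive_counts_py filter_consecutive_counts_py_alt
  split
  · -- length ≤ 1: A returns the list itself
    rename_i hle
    match cs, hle with
    | [], _ => rfl
    | [a], _ =>
      have hk : pvKeep [a] 0 = true := by simp [pvKeep]
      have hl : ((List.range ([a] : List Int).length).filter (pvKeep [a])).map
          (fun i => ([a] : List Int).getD i 0) = [a] := by
        simp [List.range_succ, hk]
      rw [hl, PySem.List.sorted_eq_self_of_pairwise _ _ (by simp)]
  · rw [pvOuter_eq_kept cs 0 [] (Or.inl rfl)]
    rw [pvKeptFrom, Nat.sub_zero, ← List.range_eq_range']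
    simp
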